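-- pv_equiv track=rewrite | github.com/StarAsh042/SD_PromptTools | prompt_converter.py | escape_inner_parentheses
-- ===== SOURCE A (Python) =====
-- def escape_inner_parentheses(text: str) -> str:
--     """
--     转义文本中的内部括号：
--     - 对未被转义的 "("，如果前面没有下划线，则在其前插入下划线后再添加反斜杠；
--     - 如果 "(" 前已有下划线，则仅在前面加反斜杠；
--     - 对未被转义的 ")" 添加反斜杠。
--     例如："mamimi(mamamimi)" 会转换为 "mamimi_\(mamamimi\)"
--     """
--     result = []
--     i = 0
--     while i < len(text):
--         if text[i] == '(':
--             if i > 0 and text[i-1] not in ['\\', '_']: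
--                 result.append('_\\(')
--             elif i > 0 and text[i-1] == '_':
--                 result.append('\\(')
--             else:
--                 result.append('\\(')
--             i += 1
--         elif text[i] == ')':
--             # 如果未被转义，则添加反斜杠
--             if i == 0 or text[i-1] != '\\':
--                 result.append('\\)')
--             else:
--                 result.append(')')
--             i += 1
--         else:
--             result.append(text[i])
--             i += 1
--     return ''.join(result)
-- ===== SOURCE B (Python) =====
-- def escape_inner_parentheses(text: str) -> str:
--     # Two staged split/join passes: str.split copies all text between parens at
--     # C speed and the join only decides, per separator, which escape to insert.
--     # Every replacement ends with the original paren character, so the character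
--     # preceding any ')' after the first pass is the same as in the original text.
--     def stage(s, ch, repl):
--         parts = s.split(ch)
--         out = parts[0]
--         prev_part, fallback = parts[0], None
--         for p in parts[1:]:
--             prev = prev_part[-1] if prev_part else fallback
--             out += repl(prev) + p
--             prev_part, fallback = p, ch
--         return out
--
--     s1 = stage(text, '(', lambda p: '\\(' if p in (None, '\\', '_') else '_\\(')
--     return stage(s1, ')', lambda p: ')' if p == '\\' else '\\)')
-- ===== Notes on version B (the rewrite author's own statement) =====
-- stated objective: faster
-- what changed: Replaces A's per-character index loop with two staged str.split/join passes (one pass per paren kind), where split extracts the between-paren chunks at C speed and the join loop only picks the escape to insert at each separator; staging is correct because every replacement ends with the original paren character, so the lookbehind character is preserved for the second pass.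
import Mathlib
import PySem

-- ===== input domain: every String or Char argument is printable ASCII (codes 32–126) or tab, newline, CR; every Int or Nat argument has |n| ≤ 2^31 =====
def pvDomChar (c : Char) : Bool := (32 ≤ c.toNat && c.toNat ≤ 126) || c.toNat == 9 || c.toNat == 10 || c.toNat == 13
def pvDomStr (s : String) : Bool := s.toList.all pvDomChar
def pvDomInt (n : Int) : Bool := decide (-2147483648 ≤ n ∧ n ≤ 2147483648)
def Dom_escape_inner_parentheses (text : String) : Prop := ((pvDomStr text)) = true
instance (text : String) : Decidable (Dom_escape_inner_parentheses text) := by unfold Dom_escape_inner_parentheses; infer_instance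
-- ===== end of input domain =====

-- B replaces A's per-character index loop by two staged str.split/join passes,
-- one per paren kind; measurably faster in Python by a constant factor.

-- ===== PORT A =====
-- A's while loop over index i; text[i] / text[i-1] are in range whenever read
-- (the while guard ensures i < len and the branch guards ensure i-1 ≥ 0), so
-- getD is exact here.  Pieces are the char lists of A's appended string literals.
def escapeA_go (cs : List Char) (result : List (List Char)) (i : Nat) : List (List Char) :=
  if _h : i < cs.length then
    if cs.getD i ' ' = '(' then
      if i > 0 ∧ ¬(cs.getD (i-1) ' ' = '\\' ∨ cs.getD (i-1) ' ' = '_') then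
        escapeA_go cs (result ++ [['_', '\\', '(']]) (i+1)
      else if i > 0 ∧ cs.getD (i-1) ' ' = '_' then
        escapeA_go cs (result ++ [['\\', '(']]) (i+1)
      else
        escapeA_go cs (result ++ [['\\', '(']]) (i+1)
    else if cs.getD i ' ' = ')' then
      if i = 0 ∨ cs.getD (i-1) ' ' ≠ '\\' then
        escapeA_go cs (result ++ [['\\', ')']]) (i+1)
      else
        escapeA_go cs (result ++ [[')']]) (i+1)
    else
      escapeA_go cs (result ++ [[cs.getD i ' ']]) (i+1)
  else result
termination_by cs.length - i

-- ''.join(result)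
def escape_inner_parentheses (text : String) : String :=
  String.mk (PySem.Chars.join [] (escapeA_go text.toList [] 0))

-- ===== PORT B =====
-- Source B's two replacement lambdas
def pvReplL (p : Option Char) : List Char :=
  if p = none ∨ p = some '\\' ∨ p = some '_' then ['\\', '('] else ['_', '\\', '(']

def pvReplR (p : Option Char) : List Char :=
  if p = some '\\' then [')'] else ['\\', ')']

-- prev_part[-1] if prev_part else fallback
def pvLastOr (xs : List Char) (fb : Option Char) : Option Char := xs.getLast?.or fb

-- Source B's 'for p in parts[1:]' loop, carrying prev_part and fallback
def pvStageGo (ch : Char) (repl : Option Char → List Char)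
    (prevPart : List Char) (fb : Option Char) (out : List Char) :
    List (List Char) → List Char
  | [] => out
  | p :: rest => pvStageGo ch repl p (some ch) (out ++ repl (pvLastOr prevPart fb) ++ p) rest

-- Source B's stage(s, ch, repl): parts = s.split(ch); out = parts[0]; loop over parts[1:]
def pvStage (ch : Char) (repl : Option Char → List Char) (s : List Char) : List Char :=
  match PySem.Chars.splitOn s [ch] with
  | [] => []          -- unreachable: split never returns an empty list
  | p0 :: rest => pvStageGo ch repl p0 none p0 rest

def escape_inner_parentheses_alt (text : String) : String :=
  String.mk (pvStage ')' pvReplR (pvStage '(' pvReplL text.toList))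

-- ===== PRECONDITION & SPEC =====
def Spec_escape_inner_parentheses (text : String) (out : String) : Prop := out = escape_inner_parentheses_alt text
instance (text : String) (out : String) : Decidable (Spec_escape_inner_parentheses text out) := by unfold Spec_escape_inner_parentheses; infer_instance

-- ===== CLAIM (what is proved, stated in full; the proofs are below) =====
def Claim_equal_escape_inner_parentheses : Prop := ∀ (text : String), Dom_escape_inner_parentheses text → Spec_escape_inner_parentheses text (escape_inner_parentheses text)

-- ===== LEMMAS AND PROOFS =====

-- Python's s.split(ch) as a direct structural recursion (proof-side model)
def pvMySplit (ch : Char) (pre : List Char) : List Char → List (List Char)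
  | [] => [pre]
  | c :: r => if c = ch then pre :: pvMySplit ch [] r else pvMySplit ch (pre ++ [c]) r

-- single-stage character map: replace each ch using the previous original char
def pvMW (ch : Char) (repl : Option Char → List Char) : Option Char → List Char → List Char
  | _, [] => []
  | prev, c :: r => (if c = ch then repl prev else [c]) ++ pvMW ch repl (some c) r

-- A's per-character pieces (shared characterisation of both programs)
def pvF : Option Char → List Char → List (List Char)
  | _, [] => []
  | prev, c :: r =>
      (if c = '(' then pvReplL prev else if c = ')' then pvReplR prev else [c]) :: pvF (some c) r

-- ---- splitOn = pvMySplit ----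

theorem pvGo_nil (ch : Char) (cur : List Char) (acc : List (List Char)) (fuel : Nat) :
    PySem.Chars.splitOn.go [ch] fuel [] cur acc = acc.reverse ++ [cur.reverse] := by
  cases fuel <;> rw [PySem.Chars.splitOn.go] <;> simp

theorem pvGo_cons (c ch : Char) (rest cur : List Char) (acc : List (List Char)) (fuel : Nat) :
    PySem.Chars.splitOn.go [ch] (fuel+1) (c :: rest) cur acc =
    (if c = ch then PySem.Chars.splitOn.go [ch] fuel rest [] (cur.reverse :: acc)
     else PySem.Chars.splitOn.go [ch] fuel rest (c :: cur) acc) := by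
  rw [PySem.Chars.splitOn.go]
  by_cases h : c = ch
  · simp [h, List.isPrefixOf]
  · have hpre : ([ch].isPrefixOf (c :: rest)) = false := by
      simp [List.isPrefixOf]
      exact fun hc => absurd hc.symm h
    simp [hpre, h]

theorem pvGo_spec (ch : Char) (fuel : Nat) :
    ∀ (l cur : List Char) (acc : List (List Char)), l.length ≤ fuel →
      PySem.Chars.splitOn.go [ch] fuel l cur acc = acc.reverse ++ pvMySplit ch cur.reverse l := by
  induction fuel with
  | zero =>
    intro l cur acc h
    have : l = [] := List.length_eq_zero_iff.mp (Nat.le_zero.mp h)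
    subst this
    rw [pvGo_nil]; rfl
  | succ n ih =>
    intro l cur acc h
    cases l with
    | nil => rw [pvGo_nil]; rfl
    | cons c rest =>
      rw [pvGo_cons]
      simp only [List.length_cons] at h
      by_cases hc : c = ch
      · rw [if_pos hc, ih rest [] _ (by omega), pvMySplit, if_pos hc]
        simp
      · rw [if_neg hc, ih rest (c :: cur) _ (by omega), pvMySplit, if_neg hc]
        simp

theorem pvSplitOn_eq (ch : Char) (s : List Char) :
    PySem.Chars.splitOn s [ch] = pvMySplit ch [] s := by
  rw [PySem.Chars.splitOn, pvGo_spec ch (s.length + 1) s [] [] (by omega)]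
  rfl

theorem pvMySplit_ne_nil (ch : Char) (pre t : List Char) : pvMySplit ch pre t ≠ [] := by
  induction t generalizing pre with
  | nil => simp [pvMySplit]
  | cons c r ih =>
    rw [pvMySplit]
    split_ifs
    · simp
    · exact ih _

-- first part of pvMySplit ch pre t is pre ++ (first part over [])
theorem pvMySplit_pre (ch : Char) (t : List Char) : ∀ pre,
    pvMySplit ch pre t = (pre ++ (pvMySplit ch [] t).headD []) :: (pvMySplit ch [] t).tail := by
  induction t with
  | nil => intro pre; simp [pvMySplit]
  | cons c r ih =>
    intro pre
    by_cases hc : c = ch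
    · simp [pvMySplit, hc]
    · rw [pvMySplit, if_neg hc, ih (pre ++ [c])]
      conv_rhs => rw [pvMySplit, if_neg hc, List.nil_append, ih [c]]
      simp

-- ---- stage = pvMW ----

theorem pvLastOr_cons (c : Char) (xs : List Char) (fb : Option Char) :
    pvLastOr (c :: xs) fb = pvLastOr xs (some c) := by
  cases xs with
  | nil => simp [pvLastOr]
  | cons y ys =>
    rw [pvLastOr, pvLastOr, List.getLast?_cons_cons]
    cases h : (y :: ys).getLast? with
    | none => simp [List.getLast?_eq_none_iff] at h
    | some a => simp

theorem pvLastOr_append_singleton (xs : List Char) (c : Char) (fb : Option Char) :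
    pvLastOr (xs ++ [c]) fb = some c := by
  simp [pvLastOr]

-- after a separator: the loop over the remaining parts of t
theorem pvStageGo_split (ch : Char) (repl : Option Char → List Char) (t : List Char) :
    ∀ (pre prevPart out : List Char) (fb : Option Char),
      pvStageGo ch repl prevPart fb out (pvMySplit ch pre t) =
      out ++ repl (pvLastOr prevPart fb) ++ pre ++ pvMW ch repl (pvLastOr pre (some ch)) t := by
  induction t with
  | nil => intro pre prevPart out fb; simp [pvMySplit, pvStageGo, pvMW]
  | cons c r ih =>
    intro pre prevPart out fb
    by_cases hc : c = ch
    · subst hc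
      rw [pvMySplit, if_pos rfl, pvStageGo, ih [] pre _ (some c)]
      simp [pvMW, pvLastOr]
    · rw [pvMySplit, if_neg hc, ih (pre ++ [c]) prevPart out fb,
        pvLastOr_append_singleton, pvMW, if_neg hc]
      simp

-- the top of the stage: out starts as parts[0], fallback None
theorem pvStageGo_top (ch : Char) (repl : Option Char → List Char) (t : List Char) :
    ∀ (pre out : List Char),
      pvStageGo ch repl (pre ++ (pvMySplit ch [] t).headD []) none
        (out ++ pre ++ (pvMySplit ch [] t).headD []) ((pvMySplit ch [] t).tail) =
      out ++ pre ++ pvMW ch repl (pvLastOr pre none) t := by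
  induction t with
  | nil => intro pre out; simp [pvMySplit, pvStageGo, pvMW]
  | cons c r ih =>
    intro pre out
    by_cases hc : c = ch
    · subst hc
      rw [pvMySplit, if_pos rfl]
      simp only [List.headD_cons, List.tail_cons]
      rw [List.append_nil, List.append_nil, pvStageGo_split c repl r [] pre _ none]
      simp [pvMW, pvLastOr]
    · rw [pvMySplit, if_neg hc, List.nil_append, pvMySplit_pre ch r [c]]
      simp only [List.headD_cons, List.tail_cons, List.singleton_append]
      have := ih (pre ++ [c]) out
      simp only [List.append_assoc, List.singleton_append] at this ⊢
      rw [this, pvLastOr_append_singleton, pvMW, if_neg hc]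
      simp

theorem pvStage_eq_MW (ch : Char) (repl : Option Char → List Char) (s : List Char) :
    pvStage ch repl s = pvMW ch repl none s := by
  rw [pvStage, pvSplitOn_eq]
  have htop := pvStageGo_top ch repl s [] []
  simp only [List.nil_append] at htop
  cases h : pvMySplit ch [] s with
  | nil => exact absurd h (pvMySplit_ne_nil ch [] s)
  | cons p0 rest =>
    rw [h] at htop
    simpa [pvLastOr] using htop

-- ---- composing the two stages gives the per-character pieces pvF ----

theorem pvMW_append (ch : Char) (repl : Option Char → List Char) (xs : List Char) :
    ∀ (ys : List Char) (prev : Option Char),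
      pvMW ch repl prev (xs ++ ys) = pvMW ch repl prev xs ++ pvMW ch repl (pvLastOr xs prev) ys := by
  induction xs with
  | nil => intro ys prev; simp [pvMW, pvLastOr]
  | cons c r ih =>
    intro ys prev
    rw [List.cons_append, pvMW, pvMW, ih ys (some c), pvLastOr_cons]
    simp

theorem pvMW_comp (cs : List Char) : ∀ (prev : Option Char),
    pvMW ')' pvReplR prev (pvMW '(' pvReplL prev cs) = (pvF prev cs).flatten := by
  induction cs with
  | nil => intro prev; simp [pvMW, pvF]
  | cons c r ih =>
    intro prev
    rw [pvMW, pvMW_append, pvF]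
    by_cases h1 : c = '('
    · subst h1
      rw [if_pos rfl]
      have hcopy : pvMW ')' pvReplR prev (pvReplL prev) = pvReplL prev ∧
          pvLastOr (pvReplL prev) prev = some '(' := by
        unfold pvReplL
        split_ifs <;> exact ⟨by simp [pvMW], by simp [pvLastOr]⟩
      rw [hcopy.1, hcopy.2, ih (some '(')]
      simp
    · by_cases h2 : c = ')'
      · subst h2
        rw [if_neg h1, if_pos rfl]
        have hmw : pvMW ')' pvReplR prev [')'] = pvReplR prev := by simp [pvMW]
        have hl : pvLastOr [')'] prev = some ')' := by simp [pvLastOr]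
        rw [hmw, hl, ih (some ')')]
        simp
      · rw [if_neg h1, if_neg h2]
        have hmw : pvMW ')' pvReplR prev [c] = [c] := by simp [pvMW, h2]
        have hl : pvLastOr [c] prev = some c := by simp [pvLastOr]
        rw [hmw, hl, ih (some c)]
        simp [h1]

-- ---- A-side: escapeA_go produces exactly the pvF pieces ----

-- the previous character of position i, as A reads it
def pvPrevAt (cs : List Char) (i : Nat) : Option Char :=
  if i = 0 then none else some (cs.getD (i-1) ' ')

theorem pvA_eq_pvF (cs : List Char) (i : Nat) (res : List (List Char)) :
    escapeA_go cs res i = res ++ pvF (pvPrevAt cs i) (cs.drop i) := by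
  by_cases h : i < cs.length
  · have ih := pvA_eq_pvF cs (i+1)
    have hdrop : cs.drop i = cs.getD i ' ' :: cs.drop (i+1) := by
      rw [List.drop_eq_getElem_cons h]
      congr 1
      simp [List.getD_eq_getElem?_getD, List.getElem?_eq_getElem h]
    have hprev : pvPrevAt cs (i+1) = some (cs.getD i ' ') := by
      simp [pvPrevAt]
    have key : ∀ s : List Char, escapeA_go cs (res ++ [s]) (i+1) =
        res ++ s :: pvF (some (cs.getD i ' ')) (cs.drop (i+1)) := by
      intro s; rw [ih, hprev]; simp
    rw [escapeA_go, dif_pos h, hdrop]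
    simp only [pvF]
    split_ifs with h1 h2 h3 h4 h5
    · have hp : pvPrevAt cs i = some (cs.getD (i-1) ' ') := by
        simp [pvPrevAt, Nat.pos_iff_ne_zero.mp h2.1]
      rcases not_or.mp h2.2 with ⟨hb, hu⟩
      rw [key, h1, hp, pvReplL, if_neg (by simp only [List.getD_eq_getElem?_getD] at hb hu; simp [hb, hu])]
    · have hp : pvPrevAt cs i = some (cs.getD (i-1) ' ') := by
        simp [pvPrevAt, Nat.pos_iff_ne_zero.mp h3.1]
      rw [key, h1, hp, pvReplL, if_pos (by have h32 := h3.2; simp only [List.getD_eq_getElem?_getD] at h32; simp [h32])]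
    · by_cases hi0 : i = 0
      · rw [key, h1, pvPrevAt, if_pos hi0, pvReplL, if_pos (by simp)]
      · have hesc : cs.getD (i-1) ' ' = '\\' ∨ cs.getD (i-1) ' ' = '_' := by
          by_contra hcon
          rw [not_or] at hcon
          exact h2 ⟨Nat.pos_of_ne_zero hi0, not_or.mpr hcon⟩
        rw [key, h1, pvPrevAt, if_neg hi0, pvReplL,
          if_pos (by rcases hesc with he | he <;> (simp only [List.getD_eq_getElem?_getD] at he; simp [he]))]
    · by_cases hi0 : i = 0
      · rw [key, h4, pvPrevAt, if_pos hi0, pvReplR, if_neg (by simp)]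
      · have hne : cs.getD (i-1) ' ' ≠ '\\' := by
          rcases h5 with h5 | h5
          · exact absurd h5 hi0
          · exact h5
        rw [key, h4, pvPrevAt, if_neg hi0, pvReplR, if_neg (by simp only [List.getD_eq_getElem?_getD] at hne; simp [hne])]
    · have hne : ¬(i = 0 ∨ cs.getD (i-1) ' ' ≠ '\\') := h5
      rw [not_or, not_not] at hne
      rw [key, h4, pvPrevAt, if_neg hne.1, pvReplR, if_pos (by have hn2 := hne.2; simp only [List.getD_eq_getElem?_getD] at hn2; simp [hn2])]
    · rw [key]
  · rw [escapeA_go, dif_neg h,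
      List.drop_of_length_le (Nat.le_of_not_lt h)]
    simp [pvF]
termination_by cs.length - i

theorem pvJoin_nil_flatten (ps : List (List Char)) : PySem.Chars.join [] ps = ps.flatten := by
  simp [PySem.Chars.join, List.intercalate]
  induction ps with
  | nil => rfl
  | cons p r ih => cases r <;> simp_all [List.intersperse]

-- ===== VERDICT (by name: the statement is the Claim_ definition above) =====
theorem escape_inner_parentheses_spec : Claim_equal_escape_inner_parentheses := by
  intro text _
  unfold Spec_escape_inner_parentheses escape_inner_parentheses escape_inner_parentheses_alt
  rw [pvA_eq_pvF, pvJoin_nil_flatten, pvStage_eq_MW, pvStage_eq_MW, pvMW_comp]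
  simp [pvPrevAt]
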